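-- pv_equiv track=rewrite | github.com/nikhoj/word2vec | evaluate_word2vec.py | build_context_map
-- ===== SOURCE A (Python) =====
-- from collections import defaultdict
--
-- def build_context_map(indexed_tokens: list[int], window: int) -> dict[int, set[int]]:
--     context_map: dict[int, set[int]] = defaultdict(set)
--     n = len(indexed_tokens)
--     for i in range(n):
--         center = indexed_tokens[i]
--         left = max(0, i - window)
--         right = min(n, i + window + 1)
--         for j in range(left, right):
--             if i == j:
--                 continue
--             context_map[center].add(indexed_tokens[j])
--     return context_map
-- ===== SOURCE B (Python) =====
-- from collections import defaultdict
--
-- def build_context_map(indexed_tokens: list[int], window: int) -> dict[int, set[int]]: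
--     context_map: dict[int, set[int]] = defaultdict(set)
--     w = max(window, 0)
--     recent: list[int] = []          # sliding window: the last <= w tokens seen
--     for tok in indexed_tokens:
--         for prev in recent:
--             context_map[prev].add(tok)
--         if recent:
--             context_map[tok].update(recent)
--         recent.append(tok)
--         if len(recent) > w:
--             del recent[0]
--     return context_map
-- ===== Notes on version B (the rewrite author's own statement) =====
-- stated objective: alternative
-- what changed: Replaces the per-center window rescan (recomputing left/right bounds and skipping i==j for every index) with a single streaming pass that keeps a sliding buffer of the last w tokens and, for each arriving token, links it symmetrically with the buffered tokens; no index arithmetic or lookahead.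
import Mathlib
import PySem

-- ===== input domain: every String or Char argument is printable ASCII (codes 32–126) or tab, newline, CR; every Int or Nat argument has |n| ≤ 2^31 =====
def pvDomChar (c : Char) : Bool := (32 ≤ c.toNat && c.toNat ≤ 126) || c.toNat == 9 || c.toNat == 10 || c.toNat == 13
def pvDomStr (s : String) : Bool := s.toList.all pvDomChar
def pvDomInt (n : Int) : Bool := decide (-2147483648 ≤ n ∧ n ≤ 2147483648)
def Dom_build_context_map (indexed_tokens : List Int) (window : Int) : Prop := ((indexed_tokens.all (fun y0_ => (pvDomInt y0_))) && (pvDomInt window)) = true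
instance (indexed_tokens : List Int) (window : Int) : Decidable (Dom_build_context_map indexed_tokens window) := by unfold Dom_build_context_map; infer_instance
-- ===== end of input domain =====

-- B replaces A's per-center window rescan (index bounds and i==j skip for every center)
-- by a single streaming pass keeping a sliding buffer of the last w tokens, linking each
-- arriving token symmetrically with the buffered ones: alternative algorithm, same cost.
-- The Python functions return a defaultdict; equivalence is about the returned mapping (ported as its items list).

-- ===== PORT A =====
def build_context_map (indexed_tokens : List Int) (window : Int) : List (Int × List Int) :=
  let n : Int := PySem.List.len indexed_tokens
  let context_map : PySem.Dict Int (List Int) :=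
    (PySem.List.pyRange 0 n).foldl (fun cm i =>
      let center := PySem.List.pyGetD indexed_tokens i 0
      let left := max 0 (i - window)
      let right := min n (i + window + 1)
      (PySem.List.pyRange left right).foldl (fun cm j =>
        if i = j then cm
        else cm.modify center [] (fun s => PySem.Set.add s (PySem.List.pyGetD indexed_tokens j 0))) cm)
      PySem.Dict.empty
  context_map.items

-- ===== PORT B =====
def build_context_map_alt (indexed_tokens : List Int) (window : Int) : List (Int × List Int) :=
  let w : Int := max window 0
  let st : PySem.Dict Int (List Int) × List Int :=
    indexed_tokens.foldl (fun st tok =>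
      let cm := st.2.foldl (fun cm prev => cm.modify prev [] (fun s => PySem.Set.add s tok)) st.1
      let cm := if st.2.isEmpty then cm else cm.modify tok [] (fun s => PySem.Set.update s st.2)
      let r := st.2 ++ [tok]
      (cm, if w < (r.length : Int) then r.drop 1 else r))
      (PySem.Dict.empty, [])
  st.1.items

-- ===== PRECONDITION & SPEC =====
def Spec_build_context_map (indexed_tokens : List Int) (window : Int) (out : List (Int × List Int)) : Prop := out = build_context_map_alt indexed_tokens window
instance (indexed_tokens : List Int) (window : Int) (out : List (Int × List Int)) : Decidable (Spec_build_context_map indexed_tokens window out) := by unfold Spec_build_context_map; infer_instance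

-- ===== CLAIM (what is proved, stated in full; the proofs are below) =====
def Claim_equal_build_context_map : Prop := ∀ (indexed_tokens : List Int) (window : Int), Dom_build_context_map indexed_tokens window → Spec_build_context_map indexed_tokens window (build_context_map indexed_tokens window)

-- ===== LEMMAS AND PROOFS =====

-- The proof represents both programs as folds of one "event" step over lists of
-- (key, value) pairs, characterizes the resulting dict, and shows A's event order
-- can be commuted into B's streaming order without changing the result.

def evStep (d : PySem.Dict Int (List Int)) (p : Int × Int) : PySem.Dict Int (List Int) :=
  d.modify p.1 [] (fun s => PySem.Set.add s p.2)

def passA (t : List Int) (w : Int) (i : Int) : List (Int × Int) :=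
  ((PySem.List.pyRange (max 0 (i - w)) (min (t.length : Int) (i + w + 1))).filter
      (fun j => decide (¬ i = j))).map
    (fun j => (PySem.List.pyGetD t i 0, PySem.List.pyGetD t j 0))

def EA (t : List Int) (w : Int) : List (Int × Int) :=
  (PySem.List.pyRange 0 (t.length : Int)).flatMap (passA t w)

lemma bcm_foldl_flatMap {α β γ : Type} (l : List α) (g : α → List β) (f : γ → β → γ) (init : γ) :
    l.foldl (fun acc i => (g i).foldl f acc) init = (l.flatMap g).foldl f init := by
  induction l generalizing init with
  | nil => rfl
  | cons a l ih => simp [List.flatMap_cons, List.foldl_append, ih]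

lemma bcm_inner_pass (t : List Int) (w i : Int) (cm : PySem.Dict Int (List Int)) :
    (PySem.List.pyRange (max 0 (i - w)) (min (t.length : Int) (i + w + 1))).foldl
      (fun cm j => if i = j then cm
        else cm.modify (PySem.List.pyGetD t i 0) [] (fun s => PySem.Set.add s (PySem.List.pyGetD t j 0))) cm
    = (passA t w i).foldl evStep cm := by
  unfold passA
  rw [List.foldl_map]
  rw [show (fun (cm : PySem.Dict Int (List Int)) j => if i = j then cm
        else cm.modify (PySem.List.pyGetD t i 0) [] (fun s => PySem.Set.add s (PySem.List.pyGetD t j 0)))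
      = (fun cm j => if ¬ i = j then
          cm.modify (PySem.List.pyGetD t i 0) [] (fun s => PySem.Set.add s (PySem.List.pyGetD t j 0)) else cm) by
    funext cm j; by_cases h : i = j <;> simp [h]]
  rw [PySem.List.foldl_ite_eq_foldl_filter]
  rfl

lemma bcm_portA_eq (t : List Int) (w : Int) :
    build_context_map t w = ((EA t w).foldl evStep PySem.Dict.empty).items := by
  unfold build_context_map EA
  simp only [PySem.List.len_eq]
  rw [← bcm_foldl_flatMap]
  congr 1
  exact PySem.List.foldl_congr_mem _ _ _ _ (fun cm i _ => bcm_inner_pass t w i cm)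

def KeyProj (E : List (Int × Int)) : List Int := PySem.Set.ofList (E.map Prod.fst)

def ValProj (E : List (Int × Int)) (c : Int) : List Int :=
  PySem.Set.ofList ((E.filter (fun p => p.1 == c)).map Prod.snd)

def EvEqv (E E' : List (Int × Int)) : Prop :=
  KeyProj E = KeyProj E' ∧ ∀ c, ValProj E c = ValProj E' c

lemma bcm_keys_res (E : List (Int × Int)) (d : PySem.Dict Int (List Int)) :
    (E.foldl evStep d).keys = PySem.Set.update d.keys (E.map Prod.fst) := by
  exact PySem.Dict.keys_foldl_modify_key E Prod.fst [] (fun d p => fun s => PySem.Set.add s p.2) d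

lemma bcm_nodup_res (E : List (Int × Int)) (d : PySem.Dict Int (List Int)) (h : d.keys.Nodup) :
    (E.foldl evStep d).keys.Nodup := by
  exact PySem.Dict.nodup_keys_foldl_modify_key E Prod.fst [] (fun d p => fun s => PySem.Set.add s p.2) d h

lemma bcm_getD_res (E : List (Int × Int)) (d : PySem.Dict Int (List Int)) (c : Int) :
    (E.foldl evStep d).getD c [] =
      PySem.Set.update (d.getD c []) ((E.filter (fun p => p.1 == c)).map Prod.snd) := by
  induction E generalizing d with
  | nil => rfl
  | cons p E ih =>
    simp only [List.foldl_cons, List.filter_cons]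
    by_cases h : p.1 = c
    · subst h
      simp only [BEq.rfl, if_pos, List.map_cons, evStep]
      rw [ih, PySem.Dict.getD_modify_self]
      rfl
    · have hb : (p.1 == c) = false := by simpa using h
      simp only [hb, Bool.false_eq_true, if_false, evStep]
      rw [ih, PySem.Dict.getD_modify_of_ne]
      exact fun hcp => h hcp.symm

lemma bcm_items_res (E : List (Int × Int)) :
    (E.foldl evStep PySem.Dict.empty).items
      = (KeyProj E).map (fun k => (k, ValProj E k)) := by
  rw [PySem.Dict.items_eq_map_keys _ (bcm_nodup_res E _ (by simp [pysem])) []]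
  rw [bcm_keys_res]
  have hk : PySem.Set.update (PySem.Dict.empty : PySem.Dict Int (List Int)).keys (E.map Prod.fst)
      = KeyProj E := by
    simp [pysem, KeyProj, PySem.Set.update_nil_left]
  rw [hk]
  refine List.map_congr_left (fun k _ => ?_)
  rw [bcm_getD_res]
  simp [pysem, ValProj, PySem.Set.update_nil_left]

lemma bcm_res_eq_of_eqv {E E' : List (Int × Int)} (h : EvEqv E E') :
    E.foldl evStep PySem.Dict.empty = E'.foldl evStep PySem.Dict.empty := by
  apply PySem.Dict.ext
  rw [bcm_items_res, bcm_items_res, h.1]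
  exact List.map_congr_left (fun k _ => by rw [h.2 k])

lemma bcm_add_mem {s : List Int} {a : Int} (h : a ∈ s) : PySem.Set.add s a = s := by
  simp [PySem.Set.add, PySem.Set.contains, h]

lemma bcm_ofList_append (A B : List Int) :
    PySem.Set.ofList (A ++ B) = B.foldl PySem.Set.add (PySem.Set.ofList A) := by
  rw [PySem.Set.ofList_eq_foldl, PySem.Set.ofList_eq_foldl, List.foldl_append]


lemma bcm_ofList_middle {P : List Int} {a : Int} (M : List Int) (h : a ∈ P) :
    PySem.Set.ofList (P ++ a :: M) = PySem.Set.ofList (P ++ M) := by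
  rw [bcm_ofList_append, bcm_ofList_append, List.foldl_cons,
    bcm_add_mem ((PySem.Set.mem_ofList _ _).mpr h)]

lemma bcm_ofList_dropL {P L : List Int} (M : List Int) (h : ∀ v ∈ L, v ∈ P) :
    PySem.Set.ofList (P ++ (L ++ M)) = PySem.Set.ofList (P ++ M) := by
  induction L with
  | nil => simp
  | cons v L ih =>
    have : P ++ (v :: L ++ M) = P ++ v :: (L ++ M) := by simp
    rw [this, bcm_ofList_middle _ (h v (by simp)), ih (fun u hu => h u (by simp [hu]))]

lemma bcm_eqv_refl (E : List (Int × Int)) : EvEqv E E := ⟨rfl, fun _ => rfl⟩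

lemma bcm_eqv_of_eq {E E' : List (Int × Int)} (h : E = E') : EvEqv E E' := h ▸ bcm_eqv_refl E

lemma bcm_eqv_trans {E₁ E₂ E₃ : List (Int × Int)} (h : EvEqv E₁ E₂) (h' : EvEqv E₂ E₃) :
    EvEqv E₁ E₃ := ⟨h.1.trans h'.1, fun c => (h.2 c).trans (h'.2 c)⟩


lemma bcm_defer (P L R : List (Int × Int)) (e : Int × Int)
    (hK : L ≠ [] → e.1 ∈ P.map Prod.fst)
    (hV : ∀ p ∈ L, p.1 = e.1 → p.2 ∈ ((P.filter (fun q => q.1 == e.1)).map Prod.snd)) :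
    EvEqv (P ++ e :: (L ++ R)) (P ++ (L ++ e :: R)) := by
  rcases eq_or_ne L [] with hL | hL
  · subst hL; exact bcm_eqv_refl _
  constructor
  · unfold KeyProj
    simp only [List.map_append, List.map_cons]
    rw [bcm_ofList_middle _ (hK hL)]
    have h2 : P.map Prod.fst ++ (L.map Prod.fst ++ e.1 :: R.map Prod.fst)
        = (P.map Prod.fst ++ L.map Prod.fst) ++ e.1 :: R.map Prod.fst := by simp
    have h3 : P.map Prod.fst ++ (L.map Prod.fst ++ R.map Prod.fst)
        = (P.map Prod.fst ++ L.map Prod.fst) ++ R.map Prod.fst := by simp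
    rw [h2, bcm_ofList_middle _ (List.mem_append_left _ (hK hL)), ← h3]
  · intro c
    unfold ValProj
    by_cases hc : e.1 = c
    · subst hc
      simp only [List.filter_append, List.filter_cons, BEq.rfl, if_pos, List.map_append, List.map_cons]
      set VP := (P.filter (fun q => q.1 == e.1)).map Prod.snd with hVP
      set VL := (L.filter (fun q => q.1 == e.1)).map Prod.snd with hVL
      set VR := (R.filter (fun q => q.1 == e.1)).map Prod.snd with hVR
      have hsub : ∀ v ∈ VL, v ∈ VP := by
        intro v hv
        rw [hVL] at hv
        rcases List.mem_map.mp hv with ⟨p, hp, rfl⟩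
        rcases List.mem_filter.mp hp with ⟨hpL, hpb⟩
        exact hV p hpL (by simpa using hpb)
      have lhs : PySem.Set.ofList (VP ++ e.2 :: (VL ++ VR))
          = PySem.Set.ofList (VP ++ e.2 :: VR) := by
        have h1 : VP ++ e.2 :: (VL ++ VR) = (VP ++ [e.2]) ++ (VL ++ VR) := by simp
        have h2 : VP ++ e.2 :: VR = (VP ++ [e.2]) ++ VR := by simp
        rw [h1, h2]
        exact bcm_ofList_dropL _ (fun v hv => List.mem_append_left _ (hsub v hv))
      have rhs : PySem.Set.ofList (VP ++ (VL ++ e.2 :: VR))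
          = PySem.Set.ofList (VP ++ e.2 :: VR) :=
        bcm_ofList_dropL _ hsub
      rw [lhs, rhs]
    · have hb : (e.1 == c) = false := by simpa using hc
      simp only [List.filter_append, List.filter_cons, hb, Bool.false_eq_true, if_false]

def blockOf (b : List (Int × Int) × Option (Int × Int)) : List (Int × Int) :=
  b.1 ++ b.2.toList

def OkBlocks : List (Int × Int) → List (List (Int × Int) × Option (Int × Int)) → Prop
  | _, [] => True
  | P, b :: rest =>
      (∀ e ∈ b.2.toList,
        ((rest.map Prod.fst).flatten ≠ [] → e.1 ∈ (P ++ b.1).map Prod.fst) ∧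
        ∀ p ∈ (rest.map Prod.fst).flatten, p.1 = e.1 →
          p.2 ∈ (((P ++ b.1).filter (fun q => q.1 == e.1)).map Prod.snd)) ∧
      OkBlocks (P ++ blockOf b) rest

lemma bcm_moveAll : ∀ (bd : List (List (Int × Int) × Option (Int × Int)))
    (P R : List (Int × Int)), OkBlocks P bd →
    EvEqv (P ++ (bd.map blockOf).flatten ++ R)
      (P ++ (bd.map Prod.fst).flatten ++ ((bd.map (fun b => b.2.toList)).flatten ++ R)) := by
  intro bd
  induction bd with
  | nil => intro P R _; simp; exact bcm_eqv_refl _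
  | cons b rest ih =>
    intro P R hok
    obtain ⟨hcond, hok'⟩ := hok
    have step1 : EvEqv (P ++ ((b :: rest).map blockOf).flatten ++ R)
        ((P ++ blockOf b) ++ (rest.map Prod.fst).flatten
          ++ ((rest.map (fun b => b.2.toList)).flatten ++ R)) := by
      have := ih (P ++ blockOf b) R hok'
      refine bcm_eqv_trans (bcm_eqv_of_eq ?_) this
      simp [List.append_assoc]
    cases hd : b.2 with
    | none =>
      refine bcm_eqv_trans step1 (bcm_eqv_of_eq ?_)
      simp [blockOf, hd, List.append_assoc]
    | some e =>
      have hdef := bcm_defer (P ++ b.1) ((rest.map Prod.fst).flatten)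
        ((rest.map (fun b => b.2.toList)).flatten ++ R) e
        (fun hne => (hcond e (by simp [hd])).1 hne)
        (fun p hp hpe => (hcond e (by simp [hd])).2 p hp hpe)
      refine bcm_eqv_trans step1 ?_
      refine bcm_eqv_trans (bcm_eqv_of_eq ?_) (bcm_eqv_trans hdef (bcm_eqv_of_eq ?_))
      · simp [blockOf, hd, List.append_assoc]
      · simp [List.append_assoc, hd]

def defOpt (s : List Int) (w x i : Int) : Option (Int × Int) :=
  if (s.length : Int) < i + w + 1 then some (PySem.List.pyGetD s i 0, x) else none

def bdOf (s : List Int) (w x : Int) : List (List (Int × Int) × Option (Int × Int)) :=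
  (PySem.List.pyRange 0 (s.length : Int)).map (fun i => (passA s w i, defOpt s w x i))

def recentIdx (s : List Int) (w : Int) : List Int :=
  PySem.List.pyRange (max 0 ((s.length : Int) - max w 0)) (s.length : Int)

lemma bcm_range_snoc (a b : Int) (h : a ≤ b) :
    PySem.List.pyRange a (b + 1) = PySem.List.pyRange a b ++ [b] := by
  have h1 : PySem.List.pyRange b (b+1) = [b] := by
    rw [PySem.List.pyRange_one_cons (show b < b+1 by omega),
        PySem.List.pyRange_one_eq_nil (le_refl (b+1))]
  rw [PySem.List.pyRange_one_append a b (b+1) h (by omega), h1]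

lemma bcm_getD_append_lt (s : List Int) (x d j : Int) (h0 : 0 ≤ j) (h1 : j < (s.length : Int)) :
    PySem.List.pyGetD (s ++ [x]) j d = PySem.List.pyGetD s j d := by
  have : j = ((j.toNat : Nat) : Int) := by omega
  rw [this, PySem.List.pyGetD_natCast, PySem.List.pyGetD_natCast]
  have hj : j.toNat < s.length := by omega
  simp [List.getD, List.getElem?_append_left hj]

lemma bcm_getD_append_self (s : List Int) (x d : Int) :
    PySem.List.pyGetD (s ++ [x]) (s.length : Int) d = x := by
  rw [PySem.List.pyGetD_natCast]
  simp [List.getD]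

lemma bcm_len_snoc (s : List Int) (x : Int) : ((s ++ [x]).length : Int) = (s.length : Int) + 1 := by
  simp

lemma bcm_passA_snoc (s : List Int) (w x i : Int) (h0 : 0 ≤ i) (hi : i < (s.length : Int)) :
    passA (s ++ [x]) w i = passA s w i ++ (defOpt s w x i).toList := by
  unfold passA defOpt
  rw [bcm_len_snoc]
  set n : Int := (s.length : Int) with hn
  have hc : PySem.List.pyGetD (s ++ [x]) i 0 = PySem.List.pyGetD s i 0 :=
    bcm_getD_append_lt s x 0 i h0 hi
  by_cases hw : n < i + w + 1
  · have hmin1 : min (n + 1) (i + w + 1) = n + 1 := by omega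
    have hmin2 : min n (i + w + 1) = n := by omega
    have ha : max 0 (i - w) ≤ n := by omega
    rw [hmin1, hmin2, bcm_range_snoc _ _ ha, List.filter_append, List.map_append]
    have hfn : List.filter (fun j => decide (¬ i = j)) [n] = [n] := by
      simp; omega
    rw [hfn, if_pos hw]
    congr 1
    · refine List.map_congr_left (fun j hj => ?_)
      have hjm := PySem.List.mem_pyRange_one.mp (List.mem_of_mem_filter hj)
      rw [hc, bcm_getD_append_lt s x 0 j (by omega) (by omega)]
    · simp only [List.map_cons, List.map_nil, hc, Option.toList_some]
      rw [hn, bcm_getD_append_self]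
  · have hmin1 : min (n + 1) (i + w + 1) = min n (i + w + 1) := by omega
    rw [hmin1, if_neg hw]
    simp only [Option.toList_none, List.append_nil]
    refine List.map_congr_left (fun j hj => ?_)
    have hjm := PySem.List.mem_pyRange_one.mp (List.mem_of_mem_filter hj)
    rw [hc, bcm_getD_append_lt s x 0 j (by omega) (by omega)]

lemma bcm_passTail_eq (s : List Int) (w x : Int) :
    passA (s ++ [x]) w ((s.length : Int)) =
      (recentIdx s w).map (fun j => (x, PySem.List.pyGetD s j 0)) := by
  unfold passA recentIdx
  rw [bcm_len_snoc]
  set n : Int := (s.length : Int) with hn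
  have hn0 : 0 ≤ n := by positivity
  by_cases hw : 1 ≤ w
  · have hmin : min (n + 1) (n + w + 1) = n + 1 := by omega
    have hmw : max w 0 = w := by omega
    have ha : max 0 (n - w) ≤ n := by omega
    rw [hmin, hmw, bcm_range_snoc _ _ ha, List.filter_append]
    have hfn : List.filter (fun j => decide (¬ n = j)) [n] = [] := by simp
    rw [hfn, List.append_nil]
    have hfs : List.filter (fun j => decide (¬ n = j)) (PySem.List.pyRange (max 0 (n - w)) n)
        = PySem.List.pyRange (max 0 (n - w)) n := by
      refine List.filter_eq_self.mpr (fun j hj => ?_)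
      have := PySem.List.mem_pyRange_one.mp hj
      simp; omega
    rw [hfs]
    refine List.map_congr_left (fun j hj => ?_)
    have hjm := PySem.List.mem_pyRange_one.mp hj
    rw [bcm_getD_append_self, bcm_getD_append_lt s x 0 j (by omega) (by omega)]
  · by_cases hw0 : w = 0
    · subst hw0
      have hmin : min (n + 1) (n + 0 + 1) = n + 1 := by omega
      have hmax : max 0 (n - 0) = n := by omega
      rw [hmin, hmax]
      have h1 : PySem.List.pyRange n (n+1) = [n] := by
        rw [PySem.List.pyRange_one_cons (show n < n+1 by omega),
            PySem.List.pyRange_one_eq_nil (le_refl (n+1))]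
      rw [h1]
      simp
    · have hneg : w ≤ -1 := by omega
      have h1 : PySem.List.pyRange (max 0 (n - w)) (min (n + 1) (n + w + 1)) = [] :=
        PySem.List.pyRange_one_eq_nil (by omega)
      have h2 : PySem.List.pyRange (max 0 (n - max w 0)) n = [] :=
        PySem.List.pyRange_one_eq_nil (by omega)
      rw [h1, h2]; simp

lemma bcm_flatten_map_singleton {α β : Type} (l : List α) (f : α → β) :
    (l.map (fun i => [f i])).flatten = l.map f := by
  induction l with
  | nil => rfl
  | cons a l ih => simp [ih]

lemma bcm_bdFst (s : List Int) (w x : Int) :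
    ((bdOf s w x).map Prod.fst).flatten = EA s w := by
  simp [bdOf, EA, List.map_map, List.flatMap_def]
  rfl

lemma bcm_bdSnd (s : List Int) (w x : Int) :
    ((bdOf s w x).map (fun b => b.2.toList)).flatten
      = (recentIdx s w).map (fun i => (PySem.List.pyGetD s i 0, x)) := by
  unfold bdOf recentIdx
  set n : Int := (s.length : Int) with hn
  have hn0 : 0 ≤ n := by positivity
  rw [List.map_map]
  by_cases hw : w ≤ 0
  · have hmw : max w 0 = 0 := by omega
    have hmax : max 0 (n - 0) = n := by omega
    rw [hmw, hmax, PySem.List.pyRange_one_eq_nil (le_refl n)]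
    have : ∀ i ∈ PySem.List.pyRange 0 n, ((fun b => b.2.toList) ∘
        (fun i => (passA s w i, defOpt s w x i))) i = ([] : List (Int × Int)) := by
      intro i hi
      have := PySem.List.mem_pyRange_one.mp hi
      simp [defOpt]; omega
    rw [List.map_congr_left this]
    simp
  · have hmw : max w 0 = w := by omega
    set a : Int := max 0 (n - w) with hadef
    have ha0 : (0:Int) ≤ a := le_max_left _ _
    have han : a ≤ n := by omega
    rw [hmw, PySem.List.pyRange_one_append 0 a n ha0 han, List.map_append, List.flatten_append]
    have h1 : ∀ i ∈ PySem.List.pyRange 0 a, ((fun b => b.2.toList) ∘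
        (fun i => (passA s w i, defOpt s w x i))) i = ([] : List (Int × Int)) := by
      intro i hi
      have := PySem.List.mem_pyRange_one.mp hi
      simp [defOpt]; omega
    have h2 : ∀ i ∈ PySem.List.pyRange a n, ((fun b => b.2.toList) ∘
        (fun i => (passA s w i, defOpt s w x i))) i = [(PySem.List.pyGetD s i 0, x)] := by
      intro i hi
      have := PySem.List.mem_pyRange_one.mp hi
      simp [defOpt]; omega
    rw [List.map_congr_left h1, List.map_congr_left h2, bcm_flatten_map_singleton]
    simp
    rfl

lemma bcm_EA_snoc (s : List Int) (w x : Int) :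
    EA (s ++ [x]) w = ((bdOf s w x).map blockOf).flatten
      ++ passA (s ++ [x]) w ((s.length : Int)) := by
  unfold EA
  rw [bcm_len_snoc]
  set n : Int := (s.length : Int) with hn
  have hn0 : 0 ≤ n := by positivity
  rw [bcm_range_snoc 0 n hn0, List.flatMap_append]
  congr 1
  · rw [show (bdOf s w x).map blockOf
        = (PySem.List.pyRange 0 n).map (fun i => passA (s ++ [x]) w i) from ?_]
    · simp [List.flatMap_def]
    · unfold bdOf
      rw [List.map_map]
      refine List.map_congr_left (fun i hi => ?_)
      have := PySem.List.mem_pyRange_one.mp hi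
      exact ((bcm_passA_snoc s w x i (by omega) (by omega)).symm : _)
  · simp [List.flatMap_cons]

lemma bcm_mem_passA (s : List Int) (w j : Int) (p : Int × Int) :
    p ∈ passA s w j ↔ ∃ j', (max 0 (j - w) ≤ j' ∧ j' < min (s.length : Int) (j + w + 1) ∧ j ≠ j')
      ∧ p = (PySem.List.pyGetD s j 0, PySem.List.pyGetD s j' 0) := by
  unfold passA
  simp only [List.mem_map, List.mem_filter, PySem.List.mem_pyRange_one, decide_eq_true_eq]
  constructor
  · rintro ⟨j', ⟨⟨h1, h2⟩, h3⟩, rfl⟩; exact ⟨j', ⟨h1, h2, h3⟩, rfl⟩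
  · rintro ⟨j', ⟨h1, h2, h3⟩, rfl⟩; exact ⟨j', ⟨⟨h1, h2⟩, h3⟩, rfl⟩

lemma bcm_ok (s : List Int) (w x : Int) : ∀ (k : Nat) (m : Int) (P : List (Int × Int)),
    0 ≤ m → m + (k : Int) = (s.length : Int) →
    OkBlocks P ((PySem.List.pyRange m (s.length : Int)).map
      (fun i => (passA s w i, defOpt s w x i))) := by
  intro k
  induction k with
  | zero =>
    intro m P h0 hk
    rw [PySem.List.pyRange_one_eq_nil (by omega)]
    trivial
  | succ k ih =>
    intro m P h0 hk
    set n : Int := (s.length : Int) with hn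
    rw [PySem.List.pyRange_one_cons (by omega : m < n)]
    simp only [List.map_cons]
    refine ⟨?_, ih (m + 1) _ (by omega) (by omega)⟩
    intro e he
    have hdef : (s.length : Int) < m + w + 1 ∧ e = (PySem.List.pyGetD s m 0, x) := by
      unfold defOpt at he
      split at he
      · exact ⟨by assumption, by simpa using he⟩
      · simp at he
    obtain ⟨hcw, rfl⟩ := hdef
    rw [← hn] at hcw
    have hLmem : ∀ p, p ∈ (((PySem.List.pyRange (m+1) n).map
          (fun i => (passA s w i, defOpt s w x i))).map Prod.fst).flatten →
        ∃ j, (m + 1 ≤ j ∧ j < n) ∧ p ∈ passA s w j := by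
      intro p hp
      rw [List.map_map] at hp
      rcases List.mem_flatten.mp hp with ⟨l, hl, hpl⟩
      rcases List.mem_map.mp hl with ⟨j, hj, rfl⟩
      exact ⟨j, PySem.List.mem_pyRange_one.mp hj, hpl⟩
    constructor
    · intro hne
      obtain ⟨p, hp⟩ := List.exists_mem_of_ne_nil _ hne
      obtain ⟨j, hjb, _⟩ := hLmem p hp
      simp only [List.map_append]
      refine List.mem_append_right _ ?_
      show PySem.List.pyGetD s m 0 ∈ List.map Prod.fst (passA s w m)
      have hev : (PySem.List.pyGetD s m 0, PySem.List.pyGetD s (m+1) 0) ∈ passA s w m := by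
        rw [bcm_mem_passA]
        exact ⟨m+1, ⟨by omega, by omega, by omega⟩, rfl⟩
      exact List.mem_map.mpr ⟨_, hev, rfl⟩
    · intro p hp hpe
      obtain ⟨j, hjb, hpj⟩ := hLmem p hp
      rcases (bcm_mem_passA s w j p).mp hpj with ⟨j', ⟨hb1, hb2, hb3⟩, rfl⟩
      simp only at hpe
      rw [List.filter_append, List.map_append]
      refine List.mem_append_right _ ?_
      have hfil : List.filter (fun q => q.1 == PySem.List.pyGetD s m 0) (passA s w m)
          = passA s w m := by
        refine List.filter_eq_self.mpr (fun q hq => ?_)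
        rcases (bcm_mem_passA s w m q).mp hq with ⟨_, _, rfl⟩
        simp
      rw [hfil]
      by_cases hj'm : j' = m
      · have hev : (PySem.List.pyGetD s m 0, PySem.List.pyGetD s j 0) ∈ passA s w m := by
          rw [bcm_mem_passA]
          exact ⟨j, ⟨by omega, by omega, by omega⟩, rfl⟩
        refine List.mem_map.mpr ⟨_, hev, ?_⟩
        show PySem.List.pyGetD s j 0 = PySem.List.pyGetD s j' 0
        rw [hj'm]
        exact hpe
      · have hev : (PySem.List.pyGetD s m 0, PySem.List.pyGetD s j' 0) ∈ passA s w m := by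
          rw [bcm_mem_passA]
          exact ⟨j', ⟨by omega, by omega, by omega⟩, rfl⟩
        exact List.mem_map.mpr ⟨_, hev, rfl⟩

def recentVals (s : List Int) (w : Int) : List Int :=
  (recentIdx s w).map (fun j => PySem.List.pyGetD s j 0)

def Bfun (w : Int) (st : PySem.Dict Int (List Int) × List Int) (tok : Int) :
    PySem.Dict Int (List Int) × List Int :=
  let cm := st.2.foldl (fun cm prev => cm.modify prev [] (fun s => PySem.Set.add s tok)) st.1
  let cm := if st.2.isEmpty then cm else cm.modify tok [] (fun s => PySem.Set.update s st.2)
  let r := st.2 ++ [tok]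
  (cm, if w < (r.length : Int) then r.drop 1 else r)

lemma bcm_alt_eq (t : List Int) (w : Int) :
    build_context_map_alt t w = ((t.foldl (Bfun (max w 0)) (PySem.Dict.empty, [])).1).items := rfl

lemma bcm_modify_modify (d : PySem.Dict Int (List Int)) (k : Int)
    (f g : List Int → List Int) :
    (d.modify k [] f).modify k [] g = d.modify k [] (fun s => g (f s)) := by
  show (d.insert k (f (d.getD k []))).insert k
      (g ((d.insert k (f (d.getD k []))).getD k [])) = d.insert k (g (f (d.getD k [])))
  rw [PySem.Dict.insert_insert_self]
  congr 2
  simp [pysem]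

lemma bcm_foldl_add_modify (r : List Int) (k : Int) (d : PySem.Dict Int (List Int)) (hr : r ≠ []) :
    r.foldl (fun cm p => cm.modify k [] (fun s => PySem.Set.add s p)) d
      = d.modify k [] (fun s => PySem.Set.update s r) := by
  induction r generalizing d with
  | nil => exact absurd rfl hr
  | cons p r ih =>
    rcases eq_or_ne r [] with rfl | hr'
    · rfl
    · rw [List.foldl_cons, ih _ hr', bcm_modify_modify]
      rfl

lemma bcm_Bfun_fst (w : Int) (d : PySem.Dict Int (List Int)) (r : List Int) (x : Int) :
    (Bfun w (d, r) x).1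
      = (r.map (fun p => (p, x)) ++ r.map (fun p => (x, p))).foldl evStep d := by
  unfold Bfun
  rcases eq_or_ne r [] with rfl | hr
  · rfl
  · have hie : r.isEmpty = false := by cases r with
      | nil => exact absurd rfl hr
      | cons a l => rfl
    simp only [hie, Bool.false_eq_true, if_false, List.foldl_append]
    rw [List.foldl_map, List.foldl_map]
    show (List.foldl (fun cm prev => cm.modify prev [] fun s => PySem.Set.add s x) d r).modify x []
        (fun s => PySem.Set.update s r) = _
    rw [← bcm_foldl_add_modify _ _ _ hr]
    rfl

lemma bcm_Bfun_snd (win : Int) (d : PySem.Dict Int (List Int)) (s : List Int) (x : Int) :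
    (Bfun (max win 0) (d, recentVals s win) x).2 = recentVals (s ++ [x]) win := by
  unfold Bfun recentVals recentIdx
  dsimp only
  set n : Int := (s.length : Int) with hn
  have hn0 : 0 ≤ n := by positivity
  set w : Int := max win 0 with hw
  have hw0 : 0 ≤ w := le_max_right _ _
  simp only [bcm_len_snoc]
  by_cases hnw : n < w
  · have ha : max 0 (n - w) = 0 := by omega
    have ha' : max 0 (n + 1 - w) = 0 := by omega
    rw [ha, ha']
    have hlr : ((PySem.List.pyRange 0 n).length : Int) = n := by
      rw [PySem.List.length_pyRange_one]; omega
    have hcond : ¬ (w < (((PySem.List.pyRange 0 n).map (fun j => PySem.List.pyGetD s j 0)).length : Int) + 1) := by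
      rw [List.length_map]; rw [hlr]; omega
    rw [if_neg hcond]
    rw [bcm_range_snoc 0 n hn0, List.map_append]
    congr 1
    · exact (List.map_congr_left (fun j hj => by
        have := PySem.List.mem_pyRange_one.mp hj
        exact bcm_getD_append_lt s x 0 j (by omega) (by omega))).symm
    · simp only [List.map_cons, List.map_nil]
      rw [hn, bcm_getD_append_self]
  · set a : Int := max 0 (n - w) with hadef
    have han : a ≤ n := by omega
    have hlr : ((PySem.List.pyRange a n).length : Int) = n - a := by
      rw [PySem.List.length_pyRange_one]; omega
    have hcond : w < (((PySem.List.pyRange a n).map (fun j => PySem.List.pyGetD s j 0)).length : Int) + 1 := by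
      rw [List.length_map]; rw [hlr]; omega
    rw [if_pos hcond]
    by_cases hw1 : w = 0
    · have ha : a = n := by omega
      have ha' : max 0 (n + 1 - w) = n + 1 := by omega
      rw [ha, ha', PySem.List.pyRange_one_eq_nil (le_refl n),
          PySem.List.pyRange_one_eq_nil (le_refl (n+1))]
      rfl
    · have ha : a = n - w := by omega
      have ha' : max 0 (n + 1 - w) = a + 1 := by omega
      have hlt : a < n := by omega
      rw [ha', PySem.List.pyRange_one_cons hlt]
      rw [bcm_range_snoc (a+1) n (by omega)]
      simp only [List.map_cons, List.map_append, List.cons_append, List.drop_succ_cons,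
        List.drop_zero]
      congr 1
      · exact (List.map_congr_left (fun j hj => by
          have := PySem.List.mem_pyRange_one.mp hj
          exact bcm_getD_append_lt s x 0 j (by omega) (by omega))).symm
      · simp only [List.map_nil]
        rw [hn, bcm_getD_append_self]

lemma bcm_res_snoc (s : List Int) (win x : Int) :
    (EA (s ++ [x]) win).foldl evStep PySem.Dict.empty
      = ((EA s win ++ ((recentVals s win).map (fun p => (p, x))
          ++ (recentVals s win).map (fun p => (x, p)))).foldl evStep PySem.Dict.empty) := by
  apply bcm_res_eq_of_eqv
  rw [bcm_EA_snoc]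
  have hok : OkBlocks [] (bdOf s win x) := by
    have := bcm_ok s win x s.length 0 [] (le_refl 0) (by omega)
    simpa [bdOf] using this
  have hmove := bcm_moveAll (bdOf s win x) [] (passA (s ++ [x]) win ((s.length : Int))) hok
  simp only [List.nil_append] at hmove
  refine bcm_eqv_trans hmove (bcm_eqv_of_eq ?_)
  rw [bcm_bdFst, bcm_bdSnd, bcm_passTail_eq]
  unfold recentVals
  simp [List.map_map]
  rfl

lemma bcm_state (t : List Int) (win : Int) :
    t.foldl (Bfun (max win 0)) (PySem.Dict.empty, [])
      = ((EA t win).foldl evStep PySem.Dict.empty, recentVals t win) := by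
  induction t using List.reverseRecOn with
  | nil =>
    have h1 : EA [] win = [] := by
      unfold EA
      rw [show ((([] : List Int).length : Int)) = 0 by simp,
        PySem.List.pyRange_one_eq_nil (le_refl 0)]
      rfl
    have h2 : recentVals [] win = [] := by
      unfold recentVals recentIdx
      rw [show ((([] : List Int).length : Int)) = 0 by simp,
        PySem.List.pyRange_one_eq_nil (le_max_left 0 _)]
      rfl
    simp [h1, h2]
  | append_singleton s x ih =>
    rw [List.foldl_append, List.foldl_cons, List.foldl_nil, ih]
    refine Prod.ext ?_ ?_
    · rw [bcm_Bfun_fst, bcm_res_snoc]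
      simp [List.foldl_append]
    · exact bcm_Bfun_snd win _ s x

-- ===== VERDICT (by name: the statement is the Claim_ definition above) =====
theorem build_context_map_spec : Claim_equal_build_context_map := by
  intro t w _
  unfold Spec_build_context_map
  rw [bcm_portA_eq, bcm_alt_eq, bcm_state]
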